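-- pv_equiv track=rewrite | github.com/nathanieltan/ToolBox-UnitTest | sortTest.py | listEdit
-- ===== SOURCE A (Python) =====
-- def listEdit(unedited):
--     unedited.sort()
--     edited = []
--     keepGoing = True
--
--     for element in unedited:
--         if element >= 0:
--             edited.append(element)
--
--     return edited
-- ===== SOURCE B (Python) =====
-- def listEdit(unedited):
--     unedited.sort()
--     lo, hi = 0, len(unedited)
--     while lo < hi:
--         mid = (lo + hi) // 2
--         if unedited[mid] < 0:
--             lo = mid + 1
--         else:
--             hi = mid
--     return unedited[lo:]
-- ===== Notes on version B (the rewrite author's own statement) =====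
-- stated objective: alternative
-- what changed: After the same in-place sort, B locates the first non-negative element by binary search and returns the suffix slice, instead of scanning every element and appending the non-negative ones.
import Mathlib
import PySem

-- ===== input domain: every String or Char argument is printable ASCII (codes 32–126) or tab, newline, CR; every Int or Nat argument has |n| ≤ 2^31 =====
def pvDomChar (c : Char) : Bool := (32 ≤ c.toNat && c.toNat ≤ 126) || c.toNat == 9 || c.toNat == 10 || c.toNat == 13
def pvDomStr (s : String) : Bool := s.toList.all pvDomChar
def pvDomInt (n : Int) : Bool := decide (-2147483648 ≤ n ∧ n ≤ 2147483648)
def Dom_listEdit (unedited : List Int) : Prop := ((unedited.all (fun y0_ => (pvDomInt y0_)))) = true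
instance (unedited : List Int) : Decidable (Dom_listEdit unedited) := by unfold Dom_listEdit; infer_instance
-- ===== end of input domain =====

-- B replaces A's element-by-element filter after the in-place sort by a binary search for
-- the first non-negative element plus a suffix slice (alternative decomposition, same cost class).
-- Both A and B sort the argument in place; the equivalence proved here is about the return value.

-- ===== PORT A =====
-- A: sort, then append every non-negative element to `edited` in a linear scan.
def listEdit (unedited : List Int) : List Int :=
  let s := PySem.List.sorted unedited (fun x => x) false
  s.foldl (fun acc e => if 0 ≤ e then acc ++ [e] else acc) []

-- ===== PORT B =====
-- the while-loop of Source B: binary search for the first index holding a non-negative element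
-- (indices stay in range, so `getD … 0` is exact for `unedited[mid]`)
def pvBisect (s : List Int) (lo hi : Nat) : Nat :=
  if lo < hi then
    let mid := (lo + hi) / 2
    if s.getD mid 0 < 0 then pvBisect s (mid + 1) hi else pvBisect s lo mid
  else lo
termination_by hi - lo
decreasing_by all_goals omega

-- B: sort in place, binary-search the cutoff, return the suffix slice `unedited[lo:]`
-- (a slice from a non-negative index is `drop`, PySem.List.slice_from_natCast)
def listEdit_alt (unedited : List Int) : List Int :=
  let s := PySem.List.sorted unedited (fun x => x) false
  s.drop (pvBisect s 0 s.length)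

-- ===== PRECONDITION & SPEC =====
def Spec_listEdit (unedited : List Int) (out : List Int) : Prop := out = listEdit_alt unedited
instance (unedited : List Int) (out : List Int) : Decidable (Spec_listEdit unedited out) := by unfold Spec_listEdit; infer_instance

-- ===== CLAIM (what is proved, stated in full; the proofs are below) =====
def Claim_equal_listEdit : Prop := ∀ (unedited : List Int), Dom_listEdit unedited → Spec_listEdit unedited (listEdit unedited)

-- ===== LEMMAS AND PROOFS =====

-- the binary search returns a cutoff k: everything below k is negative, everything from k on is ≥ 0
theorem pvBisect_cutoff (s : List Int)
    (hmono : ∀ p q : Nat, p ≤ q → q < s.length → s.getD p 0 ≤ s.getD q 0) :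
    ∀ fuel lo hi, hi - lo ≤ fuel → lo ≤ hi → hi ≤ s.length →
      (∀ i, i < lo → s.getD i 0 < 0) →
      (∀ i, hi ≤ i → i < s.length → 0 ≤ s.getD i 0) →
      (∀ i, i < pvBisect s lo hi → s.getD i 0 < 0) ∧
      (∀ i, pvBisect s lo hi ≤ i → i < s.length → 0 ≤ s.getD i 0) ∧
      pvBisect s lo hi ≤ s.length := by
  intro fuel
  induction fuel with
  | zero =>
      intro lo hi hf hlh hhl hlow hhigh
      have : lo = hi := by omega
      subst this
      rw [pvBisect]; simp; exact ⟨hlow, hhigh, hhl⟩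
  | succ n ih =>
      intro lo hi hf hlh hhl hlow hhigh
      rw [pvBisect]
      by_cases h : lo < hi
      · simp only [h, if_true]
        by_cases hm : s.getD ((lo + hi) / 2) 0 < 0
        · simp only [hm, if_true]
          refine ih ((lo+hi)/2 + 1) hi (by omega) (by omega) hhl ?_ hhigh
          intro i hi2
          exact lt_of_le_of_lt (hmono i ((lo+hi)/2) (by omega) (by omega)) hm
        · simp only [hm, if_false]
          refine ih lo ((lo+hi)/2) (by omega) (by omega) (by omega) hlow ?_
          intro i hle hil
          exact le_trans (le_of_not_gt hm) (hmono ((lo+hi)/2) i hle hil)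
      · simp only [h, if_false]
        have : lo = hi := by omega
        subst this
        exact ⟨hlow, hhigh, hhl⟩

-- if everything below k is negative and everything from k on is non-negative,
-- the filter of the non-negatives is exactly the suffix from k
theorem filter_eq_drop_of_cutoff (s : List Int) (k : Nat) (hk : k ≤ s.length)
    (hlow : ∀ i, i < k → s.getD i 0 < 0)
    (hhigh : ∀ i, k ≤ i → i < s.length → 0 ≤ s.getD i 0) :
    s.filter (fun e => decide (0 ≤ e)) = s.drop k := by
  induction s generalizing k with
  | nil => simp
  | cons x t iht =>
      cases k with
      | zero =>
          simp only [List.drop_zero]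
          have hx : 0 ≤ x := by simpa using hhigh 0 (by omega) (by simp)
          have ht : ∀ y ∈ t, 0 ≤ y := by
            intro y hy
            obtain ⟨j, hj, rfl⟩ := List.getElem_of_mem hy
            have := hhigh (j + 1) (by omega) (by simp; omega)
            simpa [List.getD, hj] using this
          rw [List.filter_cons_of_pos (by simpa using hx)]
          congr 1
          exact List.filter_eq_self.mpr (fun y hy => by simpa using ht y hy)
      | succ m =>
          have hx : x < 0 := by simpa using hlow 0 (by omega)
          rw [List.filter_cons_of_neg (by simpa using hx)]
          simp only [List.drop_succ_cons]
          refine iht m (by simpa using hk) ?_ ?_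
          · intro i hi
            simpa [List.getD] using hlow (i + 1) (by omega)
          · intro i hle hil
            simpa [List.getD] using hhigh (i + 1) (by omega) (by simp; omega)

theorem listEdit_eq_alt (unedited : List Int) :
    listEdit unedited = listEdit_alt unedited := by
  unfold listEdit listEdit_alt
  set s := PySem.List.sorted unedited (fun x => x) false with hs
  have hmono : ∀ p q : Nat, p ≤ q → q < s.length → s.getD p 0 ≤ s.getD q 0 := by
    intro p q hpq hq
    have := PySem.List.sorted_id_getElem_mono (xs := unedited) (p := p) (q := q) hpq (by simpa [hs] using hq)
    rw [List.getD_eq_getElem _ _ (by omega), List.getD_eq_getElem _ _ hq]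
    simpa [hs] using this
  obtain ⟨hlow, hhigh, hle⟩ :=
    pvBisect_cutoff s hmono s.length 0 s.length (by omega) (by omega) (le_refl _)
      (by omega) (fun i h1 h2 => by omega)
  show s.foldl (fun acc e => if 0 ≤ e then acc ++ [e] else acc) [] = s.drop (pvBisect s 0 s.length)
  have hfold : s.foldl (fun acc e => if 0 ≤ e then acc ++ [e] else acc) [] =
      s.filter (fun e => decide (0 ≤ e)) := by
    simpa using PySem.List.foldl_append_if (fun x : Int => decide (0 ≤ x)) id s []
  rw [hfold]
  exact filter_eq_drop_of_cutoff s _ hle hlow hhigh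

-- ===== VERDICT (by name: the statement is the Claim_ definition above) =====
theorem listEdit_spec : Claim_equal_listEdit := by
  intro unedited _
  exact listEdit_eq_alt unedited
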